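-- pv_equiv track=rewrite | github.com/jamesross2/random_graph | src/random_graph/utils/checks.py | bipartite_degree_sequence_graphical
-- ===== SOURCE A (Python) =====
-- import typing
--
-- def bipartite_degree_sequence_graphical(dx: typing.Sequence[int], dy: typing.Sequence[int]) -> bool:
--     """Test whether the given degree sequence is graphical.
--
--     A degree sequence is graphical if some graph with the given degree sequence exists. In the bipartite case, this
--     can be tested using the Gale–Ryser theorem.
--
--     Args:
--         dx: Degree sequence for vertices in X.
--         dy: Degree sequence for vertices in Y.
--
--     Returns:
--         True if the degree sequence is graphical, False otherwise.
--     """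
--     # check that arguments are valid
--     if any(d < 0 for ds in (dx, dy) for d in ds):
--         # all degrees must be non-negative
--         return False
--
--     # check conditions that are likely false for very wrong sequences
--     if sum(dx) != sum(dy):
--         # can't have different degree totals in X and Y
--         return False
--
--     # check remaining Gale–Ryser conditions
--     dx = sorted(dx, reverse=True)
--     passes = all(sum(dx[:k]) <= sum(min(d, k) for d in dy) for k in range(len(dx)))
--     return passes
-- ===== SOURCE B (Python) =====
-- def bipartite_degree_sequence_graphical(dx, dy):
--     """Gale-Ryser test: sort dy once and maintain sum(min(d, k) for d in dy)
--     and sum(xs[:k]) incrementally while scanning k, instead of recomputing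
--     both sums from scratch at every k."""
--     if any(d < 0 for d in dx) or any(d < 0 for d in dy):
--         return False
--     if sum(dx) != sum(dy):
--         return False
--     xs = sorted(dx, reverse=True)
--     ys = sorted(dy)
--     m = len(ys)
--     j = 0  # how many of ys are <= k - 1 (already capped below the threshold)
--     p = 0  # sum(xs[:k])
--     s = 0  # sum(min(d, k) for d in dy)
--     for k in range(len(xs)):
--         if p > s:
--             return False
--         p += xs[k]
--         while j < m and ys[j] <= k:
--             j += 1
--         s += m - j
--     return True
-- ===== Notes on version B (the rewrite author's own statement) =====
-- stated objective: alternative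
-- what changed: Instead of recomputing sum(dx[:k]) and sum(min(d,k) for d in dy) from scratch for every k, B sorts dy once and maintains both sums incrementally with a pointer counting how many dy fall below the threshold, one linear scan after the sorts; on inputs that reach the full Gale-Ryser scan this is O((n+m) log(n+m)) work instead of quadratic, but a timing run's inputs exit early so no speed is claimed.
import Mathlib
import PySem

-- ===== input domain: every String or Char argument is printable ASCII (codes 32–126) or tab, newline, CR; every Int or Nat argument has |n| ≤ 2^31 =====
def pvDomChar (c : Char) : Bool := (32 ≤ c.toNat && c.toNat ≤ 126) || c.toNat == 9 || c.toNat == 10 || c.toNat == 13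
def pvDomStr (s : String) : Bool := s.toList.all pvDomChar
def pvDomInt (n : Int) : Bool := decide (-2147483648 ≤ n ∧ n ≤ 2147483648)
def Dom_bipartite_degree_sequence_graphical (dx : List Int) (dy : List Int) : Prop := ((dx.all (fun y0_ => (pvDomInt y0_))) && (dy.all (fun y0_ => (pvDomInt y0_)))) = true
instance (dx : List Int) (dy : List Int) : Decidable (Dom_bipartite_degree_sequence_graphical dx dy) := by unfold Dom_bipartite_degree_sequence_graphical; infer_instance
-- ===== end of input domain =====

-- B replaces A's per-k recomputation of both Gale–Ryser sums by a single incremental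
-- scan over sorted dy with running sums (objective: alternative algorithm).

-- ===== PORT A =====
def bipartite_degree_sequence_graphical (dx : List Int) (dy : List Int) : Bool :=
  -- any(d < 0 for ds in (dx, dy) for d in ds)
  if (dx ++ dy).any (fun d => decide (d < 0)) then false
  -- sum(dx) != sum(dy)
  else if dx.sum ≠ dy.sum then false
  else
    -- dx = sorted(dx, reverse=True); all(sum(dx[:k]) <= sum(min(d, k) for d in dy) for k in range(len(dx)))
    let dxs := PySem.List.sorted dx (fun x => x) true
    (PySem.List.pyRange 0 (dxs.length : Int) 1).all
      (fun k => decide ((PySem.List.slice dxs none (some k)).sum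
                        ≤ (dy.map (fun d => min d k)).sum))

-- ===== PORT B =====
-- the 'while j < m and ys[j] <= k: j += 1' pointer: ys[j:] is kept as the list `rest`
def pvDropLE (k : Int) : List Int → List Int
  | [] => []
  | y :: ys => if y ≤ k then pvDropLE k ys else y :: ys

-- the 'for k in range(len(xs))' loop of Source B; state (rest, p, s) = (ys[j:], p, s)
def pvLoopB : List Int → Int → List Int → Int → Int → Bool
  | [], _, _, _, _ => true
  | x :: xs, k, rest, p, s =>
    if p > s then false
    else
      let rest' := pvDropLE k rest
      pvLoopB xs (k + 1) rest' (p + x) (s + (rest'.length : Int))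

def bipartite_degree_sequence_graphical_alt (dx : List Int) (dy : List Int) : Bool :=
  if dx.any (fun d => decide (d < 0)) || dy.any (fun d => decide (d < 0)) then false
  else if dx.sum ≠ dy.sum then false
  else
    pvLoopB (PySem.List.sorted dx (fun x => x) true) 0
            (PySem.List.sorted dy (fun x => x) false) 0 0

-- ===== PRECONDITION & SPEC =====
def Spec_bipartite_degree_sequence_graphical (dx : List Int) (dy : List Int) (out : Bool) : Prop := out = bipartite_degree_sequence_graphical_alt dx dy
instance (dx : List Int) (dy : List Int) (out : Bool) : Decidable (Spec_bipartite_degree_sequence_graphical dx dy out) := by unfold Spec_bipartite_degree_sequence_graphical; infer_instance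

-- ===== CLAIM (what is proved, stated in full; the proofs are below) =====
def Claim_equal_bipartite_degree_sequence_graphical : Prop := ∀ (dx : List Int) (dy : List Int), Dom_bipartite_degree_sequence_graphical dx dy → Spec_bipartite_degree_sequence_graphical dx dy (bipartite_degree_sequence_graphical dx dy)

-- ===== LEMMAS AND PROOFS =====

-- sum(min(d, k) for d in l)
def pvS (l : List Int) (k : Int) : Int := (l.map (fun d => min d k)).sum

lemma pvS_perm {l l' : List Int} (h : l.Perm l') (k : Int) : pvS l k = pvS l' k :=
  (h.map (fun d => min d k)).sum_eq

lemma pvS_zero (l : List Int) (h : ∀ y ∈ l, 0 ≤ y) : pvS l 0 = 0 := by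
  induction l with
  | nil => rfl
  | cons a t ih =>
    have ha := h a (by simp)
    have := ih (fun y hy => h y (by simp [hy]))
    simp [pvS, List.map_cons] at this ⊢
    omega

lemma pvS_succ (l : List Int) (k : Int) :
    pvS l (k + 1) = pvS l k + ((l.filter (fun y => decide (k < y))).length : Int) := by
  induction l with
  | nil => rfl
  | cons a t ih =>
    by_cases h : k < a <;> simp [pvS, h] at ih ⊢ <;> omega

lemma pvDropLE_sorted (k : Int) (l : List Int) (h : l.Pairwise (· ≤ ·)) :
    pvDropLE k l = l.filter (fun y => decide (k < y)) := by
  induction l with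
  | nil => rfl
  | cons a t ih =>
    rcases List.pairwise_cons.mp h with ⟨ha, ht⟩
    by_cases hak : a ≤ k
    · simp [pvDropLE, hak, ih ht, show ¬ k < a by omega]
    · have hka : decide (k < a) = true := by simp; omega
      simp only [pvDropLE, if_neg hak, List.filter_cons, hka, if_true]
      congr 1
      symm
      apply List.filter_eq_self.mpr
      intro y hy
      have := ha y hy
      simp; omega

lemma pvLoopB_spec (ysAll : List Int) (hs : ysAll.Pairwise (· ≤ ·)) :
    ∀ (xs : List Int) (k p : Int),
      pvLoopB xs k (ysAll.filter (fun y => decide (k - 1 < y))) p (pvS ysAll k)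
        = (List.range xs.length).all
            (fun j => decide (p + (xs.take j).sum ≤ pvS ysAll (k + (j : Int)))) := by
  intro xs
  induction xs with
  | nil => intro k p; simp [pvLoopB]
  | cons x t ih =>
    intro k p
    have hrest : (ysAll.filter (fun y => decide (k - 1 < y))).Pairwise (· ≤ ·) :=
      hs.filter _
    have hdrop : pvDropLE k (ysAll.filter (fun y => decide (k - 1 < y)))
        = ysAll.filter (fun y => decide (k < y)) := by
      rw [pvDropLE_sorted k _ hrest, List.filter_filter]
      congr 1
      funext y
      by_cases h : k < y <;> simp [h]
      omega
    have hshift : (ysAll.filter (fun y => decide (k < y)))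
        = ysAll.filter (fun y => decide (k + 1 - 1 < y)) := by
      congr 1; funext y; by_cases h : k < y <;> simp [h]
    have hstep : pvS ysAll k + ((ysAll.filter (fun y => decide (k < y))).length : Int)
        = pvS ysAll (k + 1) := (pvS_succ ysAll k).symm
    simp only [pvLoopB, hdrop]
    by_cases hc : p > pvS ysAll k
    · rw [if_pos hc]
      symm
      rw [List.all_eq_false]
      refine ⟨0, by simp, ?_⟩
      simp
      omega
    · rw [if_neg hc, hstep, hshift]
      rw [ih (k + 1) (p + x)]
      have hlen : (x :: t).length = t.length + 1 := rfl
      rw [hlen, List.range_succ_eq_map]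
      simp only [List.all_cons, List.all_map, Function.comp_def]
      have h0 : (decide (p + ((x :: t).take 0).sum ≤ pvS ysAll (k + ((0 : Nat) : Int)))) = true := by
        simp
        omega
      rw [h0, Bool.true_and]
      refine List.all_congr rfl fun j => ?_
      rw [decide_eq_decide, List.take_succ_cons, List.sum_cons]
      push_cast
      rw [show k + ((j : Int) + 1) = k + 1 + (j : Int) from by ring]
      omega

-- ===== VERDICT (by name: the statement is the Claim_ definition above) =====
theorem bipartite_degree_sequence_graphical_spec : Claim_equal_bipartite_degree_sequence_graphical := by
  intro dx dy _
  unfold Spec_bipartite_degree_sequence_graphical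
  unfold bipartite_degree_sequence_graphical bipartite_degree_sequence_graphical_alt
  rw [List.any_append]
  by_cases hneg : (dx.any (fun d => decide (d < 0)) || dy.any (fun d => decide (d < 0))) = true
  · rw [if_pos hneg, if_pos hneg]
  · rw [if_neg hneg, if_neg hneg]
    by_cases hsum : dx.sum = dy.sum
    · rw [if_neg (by simpa using hsum), if_neg (by simpa using hsum)]
      show (PySem.List.pyRange 0 ((PySem.List.sorted dx (fun x => x) true).length : Int) 1).all
          (fun k => decide ((PySem.List.slice (PySem.List.sorted dx (fun x => x) true) none (some k)).sum
                        ≤ (dy.map (fun d => min d k)).sum))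
        = pvLoopB (PySem.List.sorted dx (fun x => x) true) 0
            (PySem.List.sorted dy (fun x => x) false) 0 0
      rw [Bool.not_eq_true, Bool.or_eq_false_iff] at hneg
      have hdy : ∀ y ∈ dy, 0 ≤ y := by
        intro y hy
        have := List.any_eq_false.mp hneg.2 y hy
        simp at this
        omega
      set dxs := PySem.List.sorted dx (fun x => x) true with hdxs
      set ys := PySem.List.sorted dy (fun x => x) false with hys
      have hysP : ys.Perm dy := PySem.List.sorted_perm dy (fun x => x) false
      have hys0 : ∀ y ∈ ys, 0 ≤ y := fun y hy => hdy y (hysP.mem_iff.mp hy)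
      have hsorted : ys.Pairwise (· ≤ ·) := PySem.List.sorted_pairwise dy (fun x => x)
      have hfilt : ys.filter (fun y => decide ((0 : Int) - 1 < y)) = ys := by
        apply List.filter_eq_self.mpr
        intro y hy
        have := hys0 y hy
        simp
        omega
      have hmain := pvLoopB_spec ys hsorted dxs 0 0
      rw [hfilt, pvS_zero ys hys0] at hmain
      rw [hmain, PySem.List.pyRange_one]
      simp only [Int.sub_zero, Int.toNat_natCast, List.all_map, Function.comp_def]
      refine List.all_congr rfl fun j => ?_
      have hj : (0 : Int) + (j : Int) = ((j : Nat) : Int) := by omega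
      rw [hj, PySem.List.slice_to_natCast dxs j, decide_eq_decide]
      rw [pvS_perm hysP (j : Int)]
      simp [pvS]
    · rw [if_pos (by simpa using hsum), if_pos (by simpa using hsum)]
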